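-- pv_equiv track=rewrite | github.com/bona0722/today | ex4_201801902 소호정.py | sentence
-- ===== SOURCE A (Python) =====
-- def sentence(basket):
--     counter = {}
--     plural = list()
--     singular = list()
--
--     for i in basket:
--         if i in counter: counter[i] += 1
--         else: counter[i] = 1
--
--     for n in counter:
--         if counter[n] == 1:
--             if n[0] == 'a' or n[0] == 'e' or n[0] == 'i' or n[0] == 'o' or n[0] == 'u':
--                 counter[n] = 'an'
--             else: counter[n] = 'a'
--
--         elif counter[n] == 2: counter[n] = 'two'
--         elif counter[n] == 3: counter[n] = 'three'
--         else: counter[n] = 'many'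
--
--     for key, value in counter.items():
--         if value == 'two' or value == 'three' or value == 'many': plural.append(key)
--         else: singular.append(key)
--
--     basket = sorted(plural + singular)
--
--     for p in range(0,len(basket)):
--
--         if counter[basket[p]] == 'two': basket[p] = 'two '+ basket[p] +'s'
--         elif counter[basket[p]] == 'three': basket[p] = 'three' + basket[p] +'s'
--         elif counter[basket[p]] == 'many': basket[p] = 'many ' + basket[p] +'s'
--         elif basket[p][0] == 'a' or basket[p][0] == 'e' or basket[p][0] == 'i' or basket[p][0] == 'o' or basket[p][0] == 'u' :
--             basket[p] = 'an ' + basket[p]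
--         else: basket[p] = 'a ' + basket[p]
--
--     basket[0] = 'There are ' + basket[0]
--     basket[-1] = 'and ' + basket[-1] + ' in the basket.'
--
--     basket = ', '.join(basket)
--
--     return basket
-- ===== SOURCE B (Python) =====
-- def sentence(basket):
--     items = sorted(basket)
--     phrases = []
--     i = 0
--     while i < len(items):
--         j = i + 1
--         while j < len(items) and items[j] == items[i]:
--             j += 1
--         k = items[i]
--         c = j - i
--         if c == 1:
--             phrases.append(('an ' if k[0] in 'aeiou' else 'a ') + k)
--         elif c == 2:
--             phrases.append('two ' + k + 's')
--         elif c == 3: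
--             phrases.append('three' + k + 's')
--         else:
--             phrases.append('many ' + k + 's')
--         i = j
--     phrases[0] = 'There are ' + phrases[0]
--     phrases[-1] = 'and ' + phrases[-1] + ' in the basket.'
--     return ', '.join(phrases)
-- ===== Notes on version B (the rewrite author's own statement) =====
-- stated objective: alternative
-- what changed: B uses no dictionary at all: it sorts the whole basket once and scans it with two pointers, emitting one phrase per run of equal items (the run length is the count), instead of A's hash counting, value relabelling, plural/singular partition and in-place rewrite passes over the sorted keys.
import Mathlib
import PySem

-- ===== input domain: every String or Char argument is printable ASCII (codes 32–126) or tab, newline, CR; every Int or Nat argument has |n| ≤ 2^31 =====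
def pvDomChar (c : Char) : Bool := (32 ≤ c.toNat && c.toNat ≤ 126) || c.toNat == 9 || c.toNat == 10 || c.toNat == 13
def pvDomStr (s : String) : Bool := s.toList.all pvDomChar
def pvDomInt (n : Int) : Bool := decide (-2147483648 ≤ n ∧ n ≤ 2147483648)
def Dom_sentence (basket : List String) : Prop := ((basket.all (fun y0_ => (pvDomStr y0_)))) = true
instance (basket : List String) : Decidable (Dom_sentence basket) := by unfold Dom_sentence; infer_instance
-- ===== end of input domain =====

-- B replaces A's dict counting + relabelling + partition + rewrite passes by one grouped scan
-- over the sorted basket (run length = count); return-value equivalence only (A also rebinds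
-- its local name `basket`, which is not caller-visible).

-- ===== PORT A =====
-- shared final step of both Pythons: phrases[0] / phrases[-1] decoration and ', '.join
def sentenceFinish (l : List String) : String :=
  match l with
  | [] => ""              -- Python raises IndexError on l[0]; excluded by Pre_
  | x :: rest =>
    let b4 := ("There are " ++ x) :: rest
    let b5 := PySem.List.pySetD b4 (-1) ("and " ++ PySem.List.pyGetD b4 (-1) "" ++ " in the basket.")
    PySem.Str.join ", " b5

-- body of A's second loop: the string written into counter[n] (Python raises IndexError on n = ""
-- when the count is 1; that none-case is outside Pre_)
def sentenceLabel (n : String) (c : Int) : String :=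
  if c == (1 : Int) then
    match PySem.Str.pyGet? n 0 with
    | some ch => if ch == 'a' || ch == 'e' || ch == 'i' || ch == 'o' || ch == 'u' then "an" else "a"
    | none => ""
  else if c == (2 : Int) then "two"
  else if c == (3 : Int) then "three"
  else "many"

-- body of A's fourth loop: the string written back into basket[p]
def sentenceRewrite (counter2 : PySem.Dict String String) (b : String) : String :=
  if counter2.getD b "" == "two" then "two " ++ b ++ "s"
  else if counter2.getD b "" == "three" then "three" ++ b ++ "s"
  else if counter2.getD b "" == "many" then "many " ++ b ++ "s"
  else
    match PySem.Str.pyGet? b 0 with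
    | some c => if c == 'a' || c == 'e' || c == 'i' || c == 'o' || c == 'u' then "an " ++ b else "a " ++ b
    | none => ""          -- IndexError in Python; outside Pre_

def sentence (basket : List String) : String :=
  -- for i in basket: counter[i] += 1 / counter[i] = 1
  let counter : PySem.Dict String Int :=
    basket.foldl
      (fun d i => if d.contains i then d.modify i 0 (· + 1) else d.insert i 1)
      PySem.Dict.empty
  -- for n in counter: counter[n] = 'an'/'a'/'two'/'three'/'many'  (in-place value overwrite keeps order)
  let counter2 : PySem.Dict String String :=
    PySem.Dict.mk (counter.items.map (fun p => (p.1, sentenceLabel p.1 p.2)))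
  -- for key, value in counter.items(): append to plural / singular
  let pl : List String × List String :=
    counter2.items.foldl
      (fun ps kv =>
        if kv.2 == "two" || kv.2 == "three" || kv.2 == "many" then (ps.1 ++ [kv.1], ps.2)
        else (ps.1, ps.2 ++ [kv.1]))
      ([], [])
  -- basket = sorted(plural + singular)
  let basket2 := PySem.List.sorted (pl.1 ++ pl.2) (fun x => x) false
  -- for p in range(0, len(basket)): basket[p] = …  (each element rewritten independently)
  let basket3 := basket2.map (sentenceRewrite counter2)
  sentenceFinish basket3

-- ===== PORT B =====
-- the phrase appended for one run of c equal items k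
def sentenceRunPhrase (k : String) (c : Nat) : String :=
  if c == 1 then
    (match PySem.Str.pyGet? k 0 with
     | some ch => if ch == 'a' || ch == 'e' || ch == 'i' || ch == 'o' || ch == 'u' then "an " else "a "
     | none => "") ++ k   -- Python raises IndexError on k = ""; excluded by Pre_
  else if c == 2 then "two " ++ k ++ "s"
  else if c == 3 then "three" ++ k ++ "s"
  else "many " ++ k ++ "s"

-- B's two-pointer scan over the sorted list: each step consumes one maximal run of equal items
def sentenceRuns (items : List String) : List (String × Nat) :=
  match items with
  | [] => []
  | x :: xs =>
    (x, (xs.takeWhile (· == x)).length + 1) :: sentenceRuns (xs.dropWhile (· == x))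
termination_by items.length
decreasing_by
  simp only [List.length_cons]
  exact Nat.lt_succ_of_le (List.Sublist.length_le (List.dropWhile_sublist _))

def sentence_alt (basket : List String) : String :=
  let items := PySem.List.sorted basket (fun x => x) false
  let phrases := (sentenceRuns items).map (fun p => sentenceRunPhrase p.1 p.2)
  sentenceFinish phrases

-- ===== PRECONDITION & SPEC =====
-- Pre_ excludes exactly the inputs where A raises IndexError: the empty basket, and a basket in
-- which "" occurs exactly once (n[0] on the empty string).  B raises there too.
def Pre_sentence (basket : List String) : Prop := basket ≠ [] ∧ basket.count "" ≠ 1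
instance (basket : List String) : Decidable (Pre_sentence basket) := by unfold Pre_sentence; infer_instance
def pvWitness_sentence : List String := ["apple", "egg", "apple"]

def Spec_sentence (basket : List String) (out : String) : Prop := out = sentence_alt basket
instance (basket : List String) (out : String) : Decidable (Spec_sentence basket out) := by unfold Spec_sentence; infer_instance

-- ===== CLAIM (what is proved, stated in full; the proofs are below) =====
def Claim_equal_sentence : Prop := ∀ (basket : List String), Dom_sentence basket → Pre_sentence basket → Spec_sentence basket (sentence basket)

-- ===== LEMMAS AND PROOFS =====

-- A's counting step is insert-with-getD (so it is PySem.Dict.counter)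
theorem pvStepA_eq (d : PySem.Dict String Int) (x : String) :
    (if d.contains x then d.modify x 0 (· + 1) else d.insert x 1) = d.insert x (d.getD x 0 + 1) := by
  by_cases h : d.contains x
  · simp only [h, if_true]; rfl
  · simp [h, PySem.Dict.getD_of_not_contains d 0 (by simpa using h)]

-- A's partition loop is a pair of filters
theorem pvPairFold (l : List (String × String)) (acc : List String × List String) :
    l.foldl
      (fun ps kv =>
        if kv.2 == "two" || kv.2 == "three" || kv.2 == "many" then (ps.1 ++ [kv.1], ps.2)
        else (ps.1, ps.2 ++ [kv.1])) acc
    = (acc.1 ++ (l.filter (fun kv => kv.2 == "two" || kv.2 == "three" || kv.2 == "many")).map Prod.fst,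
       acc.2 ++ (l.filter (fun kv => !(kv.2 == "two" || kv.2 == "three" || kv.2 == "many"))).map Prod.fst) := by
  induction l generalizing acc with
  | nil => simp
  | cons hd tl ih =>
    rw [List.foldl_cons]
    by_cases h : (hd.2 == "two" || hd.2 == "three" || hd.2 == "many") = true
    · rw [if_pos h, ih]
      have h' := h; simp only [Bool.or_eq_true, beq_iff_eq] at h'
      rcases h' with (h' | h') | h' <;> simp [h']
    · rw [if_neg h, ih]
      have h' := h; simp only [Bool.or_eq_true, beq_iff_eq, not_or] at h'
      simp [h'.1.1, h'.1.2, h'.2]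

-- A's rewrite of one key (via its relabelled value) is B's run phrase for the same count
theorem pvPhrase_eq (b : String) (n : Nat) (h1 : 0 < n) (h2 : n = 1 → b ≠ "") :
    (if sentenceLabel b (n : Int) == "two" then "two " ++ b ++ "s"
     else if sentenceLabel b (n : Int) == "three" then "three" ++ b ++ "s"
     else if sentenceLabel b (n : Int) == "many" then "many " ++ b ++ "s"
     else
       match PySem.Str.pyGet? b 0 with
       | some c => if c == 'a' || c == 'e' || c == 'i' || c == 'o' || c == 'u' then "an " ++ b else "a " ++ b
       | none => "")
    = sentenceRunPhrase b n := by
  match n, h1 with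
  | 1, _ =>
    have hb : b ≠ "" := h2 rfl
    have hbl : b.toList ≠ [] := fun h => hb (String.ext h)
    obtain ⟨c0, cs, hcs⟩ := List.exists_cons_of_ne_nil hbl
    have hget : PySem.List.pyGet? b.toList 0 = some c0 := by
      rw [hcs]; exact PySem.List.pyGet?_zero_cons c0 cs
    by_cases hv : (c0 == 'a' || c0 == 'e' || c0 == 'i' || c0 == 'o' || c0 == 'u') = true <;>
      simp [sentenceLabel, sentenceRunPhrase, hget, hv]
  | 2, _ => simp [sentenceLabel, sentenceRunPhrase]
  | 3, _ => simp [sentenceLabel, sentenceRunPhrase]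
  | (m + 4), _ =>
    have h1' : ((m : Int) + 4 == (1 : Int)) = false := by simp; omega
    have h2' : ((m : Int) + 4 == (2 : Int)) = false := by simp; omega
    have h3' : ((m : Int) + 4 == (3 : Int)) = false := by simp; omega
    simp [sentenceLabel, sentenceRunPhrase, h1', h2', h3']

-- B's grouped scan of a weakly sorted list: strictly increasing keys, same members,
-- and each recorded run length is the element's count
theorem pvRuns_spec (m : List String) (hs : m.Pairwise (· ≤ ·)) :
    ((sentenceRuns m).map Prod.fst).Pairwise (· < ·) ∧
    (∀ x, x ∈ (sentenceRuns m).map Prod.fst ↔ x ∈ m) ∧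
    (∀ p ∈ sentenceRuns m, p.2 = m.count p.1) := by
  induction m using sentenceRuns.induct with
  | case1 => simp [sentenceRuns]
  | case2 x xs ih =>
    rw [List.pairwise_cons] at hs
    obtain ⟨hxle, hxs⟩ := hs
    have hsr : (xs.dropWhile (· == x)).Pairwise (· ≤ ·) := hxs.sublist (List.dropWhile_sublist _)
    obtain ⟨ihp, ihm, ihc⟩ := ih hsr
    have hxlt : ∀ y ∈ xs.dropWhile (· == x), x < y := by
      cases hre : xs.dropWhile (· == x) with
      | nil => simp
      | cons y0 rt =>
        intro y hy
        have hy0 : (y0 == x) = false := by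
          have := List.head_dropWhile_not (· == x) (l := xs) (by rw [hre]; simp)
          simpa [hre] using this
        have hy0x : x < y0 := by
          have hy0mem : y0 ∈ xs := (List.dropWhile_sublist (· == x)).mem (by rw [hre]; exact List.mem_cons_self)
          exact lt_of_le_of_ne (hxle y0 hy0mem) (fun h => by simp [← h] at hy0)
        rcases List.mem_cons.mp hy with rfl | hy
        · exact hy0x
        · have : y0 ≤ y := by
            rw [hre] at hsr
            exact (List.pairwise_cons.mp hsr).1 y hy
          exact lt_of_lt_of_le hy0x this
    have hxne : ∀ y ∈ xs.dropWhile (· == x), y ≠ x := fun y hy => (hxlt y hy).ne'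
    have htcnt : ∀ y ∈ xs.takeWhile (· == x), y = x := fun y hy => beq_iff_eq.mp (List.mem_takeWhile_imp (p := (· == x)) hy)
    have hcx : (x :: xs).count x = (xs.takeWhile (· == x)).length + 1 := by
      rw [List.count_cons_self]
      congr 1
      conv_lhs => rw [← List.takeWhile_append_dropWhile (p := (· == x)) (l := xs)]
      rw [List.count_append]
      have h1 : (xs.takeWhile (· == x)).count x = (xs.takeWhile (· == x)).length :=
        List.count_eq_length.mpr fun y hy => (htcnt y hy).symm
      have h2 : (xs.dropWhile (· == x)).count x = 0 :=
        List.count_eq_zero.mpr fun hmem => (hxne x hmem) rfl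
      omega
    refine ⟨?_, ?_, ?_⟩
    · rw [sentenceRuns]
      simp only [List.map_cons, List.pairwise_cons]
      refine ⟨fun y hy => hxlt y ((ihm y).mp hy), ihp⟩
    · intro y
      rw [sentenceRuns]
      simp only [List.map_cons, List.mem_cons, ihm y]
      constructor
      · rintro (rfl | h)
        · exact .inl rfl
        · exact .inr ((List.dropWhile_sublist _).mem h)
      · rintro (rfl | h)
        · exact .inl rfl
        · conv_lhs at h => rw [← List.takeWhile_append_dropWhile (p := (· == x)) (l := xs)]
          rcases List.mem_append.mp h with h | h
          · exact .inl (htcnt y h)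
          · exact .inr h
    · intro p hp
      rw [sentenceRuns] at hp
      rcases List.mem_cons.mp hp with rfl | hp
      · exact hcx.symm
      · have hne : p.1 ≠ x := by
          have : p.1 ∈ (sentenceRuns (xs.dropWhile (· == x))).map Prod.fst := List.mem_map_of_mem hp
          exact hxne p.1 ((ihm p.1).mp this)
        rw [ihc p hp]
        rw [List.count_cons,
          show xs.count p.1 = (xs.takeWhile (· == x)).count p.1 + (xs.dropWhile (· == x)).count p.1 by
            conv_lhs => rw [← List.takeWhile_append_dropWhile (p := (· == x)) (l := xs)]
            exact List.count_append ..]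
        simp only [beq_iff_eq]
        rw [if_neg (show ¬ x = p.1 from fun h => hne h.symm)]
        have h0t : (xs.takeWhile (· == x)).count p.1 = 0 :=
          List.count_eq_zero.mpr fun hmem => hne (htcnt p.1 hmem)
        omega

-- A's phrase list is the canonical one: sorted distinct keys mapped to their run phrases
theorem pvA_list (basket : List String) (hcnt : basket.count "" ≠ 1) :
    sentence basket
      = sentenceFinish ((PySem.List.sorted (PySem.Set.ofList basket) (fun x => x) false).map
          (fun k => sentenceRunPhrase k (basket.count k))) := by
  have hstep : (fun (d : PySem.Dict String Int) i =>
      if d.contains i then d.modify i 0 (· + 1) else d.insert i 1)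
      = fun (d : PySem.Dict String Int) i => d.insert i (d.getD i 0 + 1) :=
    funext fun d => funext fun x => pvStepA_eq d x
  simp only [sentence, hstep, PySem.Dict.foldl_insert_getD_add_one_eq_counter,
    PySem.Dict.items_counter, List.map_map, Function.comp_def]
  rw [pvPairFold]
  simp only [List.nil_append]
  set S : List String := PySem.Set.ofList basket with hS
  set l2 : List (String × String) :=
    S.map (fun x => (x, sentenceLabel x ((List.count x basket : Int)))) with hl2
  have hfst : l2.map Prod.fst = S := by
    rw [hl2, List.map_map]
    rw [show List.map ((Prod.fst) ∘ fun x => (x, sentenceLabel x ((List.count x basket : Int)))) S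
        = List.map id S from List.map_congr_left fun x _ => rfl, List.map_id]
  have hperm :
      ((l2.filter (fun kv => kv.2 == "two" || kv.2 == "three" || kv.2 == "many")).map Prod.fst ++
        (l2.filter (fun kv => !(kv.2 == "two" || kv.2 == "three" || kv.2 == "many"))).map Prod.fst).Perm S := by
    have h1 := (List.filter_append_perm
      (fun kv : String × String => kv.2 == "two" || kv.2 == "three" || kv.2 == "many") l2).map Prod.fst
    rw [List.map_append] at h1
    exact hfst ▸ h1
  rw [PySem.List.sorted_eq_sorted_of_perm _ S (fun x => x) (fun a b h => h) hperm]
  have hmap : ∀ b ∈ PySem.List.sorted S (fun x => x) false,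
      sentenceRewrite (PySem.Dict.mk l2) b = sentenceRunPhrase b (basket.count b) := by
    intro b hb
    have hbS : b ∈ S := (PySem.List.mem_sorted S (fun x => x) false b).1 hb
    have hbb : b ∈ basket := (PySem.Set.mem_ofList basket b).1 (hS ▸ hbS)
    have hnodup : (PySem.Dict.mk l2).keys.Nodup := by
      have : (PySem.Dict.mk l2).keys = l2.map Prod.fst := rfl
      rw [this, hfst, hS]; exact PySem.Set.nodup_ofList basket
    have hmem : (b, sentenceLabel b ((List.count b basket : Int))) ∈ (PySem.Dict.mk l2).items :=
      List.mem_map.2 ⟨b, hbS, rfl⟩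
    have hget2 : (PySem.Dict.mk l2).getD b "" = sentenceLabel b ((List.count b basket : Int)) :=
      PySem.Dict.getD_of_mem_items _ hmem hnodup ""
    have hpos : 0 < List.count b basket := List.count_pos_iff.2 hbb
    have hone : List.count b basket = 1 → b ≠ "" := fun h h0 => hcnt (h0 ▸ h)
    simp only [sentenceRewrite, hget2]
    exact pvPhrase_eq b (List.count b basket) hpos hone
  rw [List.map_congr_left hmap]

-- B's phrase list is the same canonical one
theorem pvB_list (basket : List String) :
    sentence_alt basket
      = sentenceFinish ((PySem.List.sorted (PySem.Set.ofList basket) (fun x => x) false).map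
          (fun k => sentenceRunPhrase k (basket.count k))) := by
  have hsp : (PySem.List.sorted basket (fun x => x) false).Pairwise (· ≤ ·) := by
    have := PySem.List.sorted_pairwise basket (fun x => x)
    simpa using this
  obtain ⟨hp, hm, hc⟩ := pvRuns_spec _ hsp
  have hKnodup : ((sentenceRuns (PySem.List.sorted basket (fun x => x) false)).map Prod.fst).Nodup :=
    hp.imp ne_of_lt
  have hKperm : ((sentenceRuns (PySem.List.sorted basket (fun x => x) false)).map Prod.fst).Perm
      (PySem.Set.ofList basket) := by
    rw [List.perm_ext_iff_of_nodup hKnodup (PySem.Set.nodup_ofList basket)]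
    intro y
    rw [hm y, PySem.List.mem_sorted, PySem.Set.mem_ofList]
  have hK : PySem.List.sorted (PySem.Set.ofList basket) (fun x => x) false
      = (sentenceRuns (PySem.List.sorted basket (fun x => x) false)).map Prod.fst :=
    PySem.List.sorted_eq_of_perm_of_pairwise_lt _ _ _ hKperm hp
  simp only [sentence_alt, hK, List.map_map, Function.comp_def]
  congr 1
  apply List.map_congr_left
  intro p hp'
  rw [hc p hp', List.Perm.count_eq (PySem.List.sorted_perm basket (fun x => x) false)]

-- ===== VERDICT (by name: the statement is the Claim_ definition above) =====
theorem sentence_spec : Claim_equal_sentence := by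
  intro basket _ hpre
  unfold Spec_sentence
  rw [pvA_list basket hpre.2, pvB_list basket]
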